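-- pv_equiv track=rewrite | github.com/Mohamad-Hachem/University | python/generateString.py | checkCond
-- ===== SOURCE A (Python) =====
-- def checkCond(listOfNumbers,S):
--     length = len(listOfNumbers)
--     if(length < 3):
--         return
--     else:
--         for i in range(len(listOfNumbers)):
--             for j in range(i,len(listOfNumbers)):
--                  if(j+2 <= len(listOfNumbers)-1):
--                     if(not(listOfNumbers[j]+listOfNumbers[j+1]+listOfNumbers[j+2] <= S)):
--                         return False
--     return True
-- ===== SOURCE B (Python) =====
-- def checkCond(listOfNumbers, S):
--     if len(listOfNumbers) < 3:
--         return
--     return all(a + b + c <= S for a, b, c in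
--                zip(listOfNumbers, listOfNumbers[1:], listOfNumbers[2:]))
-- ===== Notes on version B (the rewrite author's own statement) =====
-- stated objective: idiomatic
-- what changed: Replaced A's nested index loops (each outer iteration rescanning the remaining triples) by a single all()-over-zip pass over consecutive triples.
import Mathlib
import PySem

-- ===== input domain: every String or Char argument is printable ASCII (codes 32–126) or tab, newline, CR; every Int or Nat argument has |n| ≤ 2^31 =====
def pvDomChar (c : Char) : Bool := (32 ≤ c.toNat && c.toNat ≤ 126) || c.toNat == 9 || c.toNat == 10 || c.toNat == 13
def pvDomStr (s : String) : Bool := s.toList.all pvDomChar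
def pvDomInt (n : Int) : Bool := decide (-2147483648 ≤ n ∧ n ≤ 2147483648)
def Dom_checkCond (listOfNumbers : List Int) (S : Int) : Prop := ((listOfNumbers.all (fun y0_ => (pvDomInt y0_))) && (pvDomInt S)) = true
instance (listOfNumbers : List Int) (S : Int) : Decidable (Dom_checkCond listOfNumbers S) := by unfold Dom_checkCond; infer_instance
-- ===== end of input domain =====

-- ===== PORT A =====
-- A: None if fewer than 3 elements; otherwise nested i/j index loops, returning
-- False on the first consecutive triple exceeding S, else True. B does the same
-- check in a single idiomatic all()-over-zip pass over consecutive triples.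

def pvBad (listOfNumbers : List Int) (S j : Int) : Bool :=
  !(PySem.List.pyGetD listOfNumbers j 0 + PySem.List.pyGetD listOfNumbers (j+1) 0
      + PySem.List.pyGetD listOfNumbers (j+2) 0 ≤ S)

-- inner 'for j in range(i, len)' loop: false = early 'return False'
def pvLoopJ (listOfNumbers : List Int) (S : Int) : List Int → Bool
  | [] => true
  | j :: js =>
    if j + 2 ≤ (listOfNumbers.length : Int) - 1 then
      if pvBad listOfNumbers S j then false else pvLoopJ listOfNumbers S js
    else pvLoopJ listOfNumbers S js

-- outer 'for i in range(len)' loop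
def pvLoopI (listOfNumbers : List Int) (S : Int) : List Int → Option Bool
  | [] => some true
  | i :: is =>
    if pvLoopJ listOfNumbers S (PySem.List.pyRange i listOfNumbers.length 1) then
      pvLoopI listOfNumbers S is
    else some false

def checkCond (listOfNumbers : List Int) (S : Int) : Option Bool :=
  if (listOfNumbers.length : Int) < 3 then none
  else pvLoopI listOfNumbers S (PySem.List.pyRange 0 listOfNumbers.length 1)

-- ===== PORT B =====
-- all(a+b+c <= S for a,b,c in zip(xs, xs[1:], xs[2:])): one pass over consecutive triples
def pvAllTriples (S : Int) : List Int → Bool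
  | a :: b :: c :: rest => (a + b + c ≤ S) && pvAllTriples S (b :: c :: rest)
  | _ => true

def checkCond_alt (listOfNumbers : List Int) (S : Int) : Option Bool :=
  if (listOfNumbers.length : Int) < 3 then none
  else some (pvAllTriples S listOfNumbers)

-- ===== PRECONDITION & SPEC =====
def Spec_checkCond (listOfNumbers : List Int) (S : Int) (out : Option Bool) : Prop := out = checkCond_alt listOfNumbers S
instance (listOfNumbers : List Int) (S : Int) (out : Option Bool) : Decidable (Spec_checkCond listOfNumbers S out) := by unfold Spec_checkCond; infer_instance

-- ===== CLAIM (what is proved, stated in full; the proofs are below) =====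
def Claim_equal_checkCond : Prop := ∀ (listOfNumbers : List Int) (S : Int), Dom_checkCond listOfNumbers S → Spec_checkCond listOfNumbers S (checkCond listOfNumbers S)

-- ===== LEMMAS AND PROOFS =====

theorem pvLoopJ_true_iff (xs : List Int) (S : Int) (js : List Int) :
    pvLoopJ xs S js = true ↔
      ∀ j ∈ js, j + 2 ≤ (xs.length : Int) - 1 → pvBad xs S j = false := by
  induction js with
  | nil => simp [pvLoopJ]
  | cons j js ih =>
    simp only [pvLoopJ, List.mem_cons]
    split_ifs with h1 h2
    · simp only [false_iff]
      push Not
      exact ⟨j, Or.inl rfl, h1, by simp [h2]⟩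
    · constructor
      · intro h k hk hlen
        rcases hk with rfl | hk
        · simpa using h2
        · exact (ih.mp h) k hk hlen
      · intro h; exact ih.mpr fun k hk hlen => h k (Or.inr hk) hlen
    · constructor
      · intro h k hk hlen
        rcases hk with rfl | hk
        · exact absurd hlen h1
        · exact (ih.mp h) k hk hlen
      · intro h; exact ih.mpr fun k hk hlen => h k (Or.inr hk) hlen

theorem pvAllTriples_true_iff (S : Int) (xs : List Int) :
    pvAllTriples S xs = true ↔
      ∀ k : Nat, k + 2 < xs.length →
        xs.getD k 0 + xs.getD (k+1) 0 + xs.getD (k+2) 0 ≤ S := by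
  induction xs with
  | nil => simp [pvAllTriples]
  | cons a xs ih =>
    match xs, ih with
    | [], _ => simp [pvAllTriples]
    | [b], _ => simp [pvAllTriples]
    | b :: c :: rest, ih =>
      simp only [pvAllTriples, Bool.and_eq_true, decide_eq_true_eq, ih]
      constructor
      · rintro ⟨h0, h⟩ k hk
        cases k with
        | zero => simpa using h0
        | succ k => exact h k (by simpa using hk)
      · intro h
        refine ⟨by simpa using h 0 (by simp), fun k hk => ?_⟩
        have := h (k+1) (by simp at hk ⊢; omega)
        simpa using this

theorem pvLoopI_all_true (xs : List Int) (S : Int) (is : List Int)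
    (h : ∀ i ∈ is, pvLoopJ xs S (PySem.List.pyRange i xs.length 1) = true) :
    pvLoopI xs S is = some true := by
  induction is with
  | nil => rfl
  | cons i is ih =>
    simp only [pvLoopI, h i (List.mem_cons_self ..), if_true]
    exact ih fun k hk => h k (List.mem_cons_of_mem _ hk)

theorem checkCond_eq_some_loopJ (xs : List Int) (S : Int) (h3 : ¬ (xs.length : Int) < 3) :
    checkCond xs S = some (pvLoopJ xs S (PySem.List.pyRange 0 xs.length 1)) := by
  simp only [checkCond, if_neg h3]
  by_cases hfull : pvLoopJ xs S (PySem.List.pyRange 0 xs.length 1) = true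
  · rw [hfull]
    apply pvLoopI_all_true
    intro i hi
    rw [pvLoopJ_true_iff]
    intro j hj hlen
    have hmem : j ∈ PySem.List.pyRange 0 xs.length 1 := by
      rw [PySem.List.mem_pyRange_one] at hi hj ⊢
      omega
    exact (pvLoopJ_true_iff xs S _).mp hfull j hmem hlen
  · have hrange : PySem.List.pyRange 0 (xs.length : Int) 1
        = 0 :: PySem.List.pyRange 1 xs.length 1 := by
      rw [PySem.List.pyRange_one_cons (by omega)]; norm_num
    rw [Bool.not_eq_true] at hfull
    rw [hfull]
    conv_lhs => rw [hrange]
    simp [pvLoopI, hfull]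

theorem pvBad_false_iff (xs : List Int) (S : Int) (k : Nat) :
    pvBad xs S (k : Int) = false ↔
      xs.getD k 0 + xs.getD (k+1) 0 + xs.getD (k+2) 0 ≤ S := by
  unfold pvBad
  rw [show ((k : Int) + 1) = ((k+1 : Nat) : Int) by push_cast; ring,
      show ((k : Int) + 2) = ((k+2 : Nat) : Int) by push_cast; ring,
      PySem.List.pyGetD_natCast, PySem.List.pyGetD_natCast, PySem.List.pyGetD_natCast]
  simp

theorem loopJ_eq_allTriples (xs : List Int) (S : Int) :
    pvLoopJ xs S (PySem.List.pyRange 0 xs.length 1) = pvAllTriples S xs := by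
  rw [Bool.eq_iff_iff, pvLoopJ_true_iff, pvAllTriples_true_iff]
  constructor
  · intro h k hk
    exact (pvBad_false_iff xs S k).mp
      (h (k : Int) (by rw [PySem.List.mem_pyRange_one]; omega) (by omega))
  · intro h j hj hlen
    rw [PySem.List.mem_pyRange_one] at hj
    obtain ⟨k, rfl⟩ : ∃ k : Nat, j = (k : Int) := ⟨j.toNat, (Int.toNat_of_nonneg hj.1).symm⟩
    exact (pvBad_false_iff xs S k).mpr (h k (by omega))

-- ===== VERDICT (by name: the statement is the Claim_ definition above) =====
theorem checkCond_spec : Claim_equal_checkCond := by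
  intro xs S _
  unfold Spec_checkCond checkCond_alt
  by_cases h3 : (xs.length : Int) < 3
  · simp [checkCond, h3]
  · rw [if_neg h3, checkCond_eq_some_loopJ xs S h3, loopJ_eq_allTriples]
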